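-- pv_equiv track=rewrite | github.com/p1an0guy/fhda-finance-forms | form-chooser.py | fallback_keyword_matching
-- ===== SOURCE A (Python) =====
-- def fallback_keyword_matching(user_input, forms_list, num_results=3):
--     """
--     Fallback method to find forms using simple keyword matching.
--
--     Args:
--         user_input (str): User's request
--         forms_list (list): List of available forms
--         num_results (int): Number of results to return
--
--     Returns:
--         list: Top matching forms
--     """
--     user_lower = user_input.lower()
--     scored_forms = []
--
--     for form in forms_list:
--         score = 0
--         form_words = form.lower().replace('.pdf', '').replace('_', ' ').split()
--
--         # Score based on word matches
--         for word in form_words: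
--             if word in user_lower:
--                 score += len(word)  # Longer matches get higher scores
--
--         if score > 0:
--             scored_forms.append((score, form))
--
--     # Sort by score (descending) and return top results
--     scored_forms.sort(reverse=True)
--
--     # If we have scored results, return them
--     if scored_forms:
--         return [form for score, form in scored_forms[:num_results]]
--
--     # If no keyword matches, return first few forms
--     return forms_list[:num_results]
-- ===== SOURCE B (Python) =====
-- def fallback_keyword_matching(user_input, forms_list, num_results=3):
--     """Select the top matching forms by repeated max-extraction instead of a full sort."""
--     user_lower = user_input.lower()
--     scored = []
--     for form in forms_list:
--         words = form.lower().replace('.pdf', '').replace('_', ' ').split()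
--         score = sum(len(w) for w in words if w in user_lower)
--         if score > 0:
--             scored.append((score, form))
--     if not scored:
--         return forms_list[:num_results]
--     result = []
--     while scored and len(result) < num_results:
--         best = max(scored)
--         scored.remove(best)
--         result.append(best[1])
--     return result
-- ===== Notes on version B (the rewrite author's own statement) =====
-- stated objective: alternative
-- what changed: Scores are computed as a sum over matching words and the top num_results forms are selected by repeatedly extracting the maximum (score, form) tuple instead of fully sorting and slicing; Pre_ restricts to the natural domain num_results >= 0, since a negative count only means something via Python's negative-slice accident in A.
-- outside the precondition, e.g. on fallback_keyword_matching('form', ['form.pdf', 'tax_form.pdf'], -1): A returns ['tax_form.pdf'], B returns []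
import Mathlib
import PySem

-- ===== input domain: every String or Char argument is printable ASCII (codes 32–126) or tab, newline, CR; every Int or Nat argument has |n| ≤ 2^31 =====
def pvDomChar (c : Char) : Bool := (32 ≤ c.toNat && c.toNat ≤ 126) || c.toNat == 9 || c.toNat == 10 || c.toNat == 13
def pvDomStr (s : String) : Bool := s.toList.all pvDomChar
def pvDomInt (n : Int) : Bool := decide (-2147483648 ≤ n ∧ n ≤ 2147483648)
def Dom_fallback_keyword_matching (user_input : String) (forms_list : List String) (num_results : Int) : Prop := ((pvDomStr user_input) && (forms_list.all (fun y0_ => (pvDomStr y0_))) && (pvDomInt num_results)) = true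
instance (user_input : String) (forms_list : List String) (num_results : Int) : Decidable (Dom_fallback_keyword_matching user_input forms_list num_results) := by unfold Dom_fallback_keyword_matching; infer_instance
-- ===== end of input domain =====

-- B replaces A's full sort + slice by repeated max-extraction of the top num_results scored forms (alternative selection algorithm; same results on num_results ≥ 0).

-- ===== PORT A =====
def fallback_keyword_matching (user_input : String) (forms_list : List String) (num_results : Int) : List String :=
  let user_lower := PySem.Str.lower user_input
  let scored_forms : List (Int × String) := forms_list.foldl (fun acc form =>
      let form_words := PySem.Str.split₀ (PySem.Str.replace (PySem.Str.replace (PySem.Str.lower form) ".pdf" "") "_" " ")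
      let score : Int := form_words.foldl (fun score word =>
          if PySem.Str.isIn word user_lower then score + PySem.Str.len word else score) 0
      if 0 < score then acc ++ [(score, form)] else acc) []
  -- scored_forms.sort(reverse=True) on tuples: lexicographic on (score, form)
  let sorted_forms := PySem.List.sorted2 scored_forms Prod.fst Prod.snd true
  if sorted_forms ≠ [] then (PySem.List.slice sorted_forms none (some num_results)).map Prod.snd
  else PySem.List.slice forms_list none (some num_results)

-- ===== PORT B =====
-- the 'while scored and len(result) < num_results' loop of Source B: pop the max
-- (Python tuple order = lexicographic) until num_results taken or scored empty;
-- remove? = none would be Python's ValueError, unreachable because best ∈ scored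
def pvExtract : Nat → List (Int × String) → List String
  | 0, _ => []
  | Nat.succ k, scored =>
    match PySem.List.max2? scored Prod.fst Prod.snd with
    | none => []
    | some best => best.2 :: pvExtract k ((PySem.List.remove? scored best).getD [])

def fallback_keyword_matching_alt (user_input : String) (forms_list : List String) (num_results : Int) : List String :=
  let user_lower := PySem.Str.lower user_input
  let scored : List (Int × String) := forms_list.foldl (fun acc form =>
      let words := PySem.Str.split₀ (PySem.Str.replace (PySem.Str.replace (PySem.Str.lower form) ".pdf" "") "_" " ")
      let score : Int := ((words.filter (fun w => PySem.Str.isIn w user_lower)).map (fun w => PySem.Str.len w)).sum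
      if 0 < score then acc ++ [(score, form)] else acc) []
  if scored = [] then PySem.List.slice forms_list none (some num_results)
  else pvExtract num_results.toNat scored

-- ===== PRECONDITION & SPEC =====
-- Pre_ restricts to the natural domain num_results ≥ 0: for negative num_results A's value is an
-- accident of Python's negative-slice semantics (scored_forms[:num_results] drops the LAST forms),
-- while B's loop naturally takes none; such negative counts are excluded although A returns there.
def Pre_fallback_keyword_matching (user_input : String) (forms_list : List String) (num_results : Int) : Prop := 0 ≤ num_results
instance (user_input : String) (forms_list : List String) (num_results : Int) : Decidable (Pre_fallback_keyword_matching user_input forms_list num_results) := by unfold Pre_fallback_keyword_matching; infer_instance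

def pvWitness_fallback_keyword_matching : String × List String × Int := ("tax form", ["tax_form.pdf", "other.pdf"], 3)

def Spec_fallback_keyword_matching (user_input : String) (forms_list : List String) (num_results : Int) (out : List String) : Prop := out = fallback_keyword_matching_alt user_input forms_list num_results
instance (user_input : String) (forms_list : List String) (num_results : Int) (out : List String) : Decidable (Spec_fallback_keyword_matching user_input forms_list num_results out) := by unfold Spec_fallback_keyword_matching; infer_instance

-- ===== CLAIM (what is proved, stated in full; the proofs are below) =====
def Claim_equal_fallback_keyword_matching : Prop := ∀ (user_input : String) (forms_list : List String) (num_results : Int), Dom_fallback_keyword_matching user_input forms_list num_results → Pre_fallback_keyword_matching user_input forms_list num_results → Spec_fallback_keyword_matching user_input forms_list num_results (fallback_keyword_matching user_input forms_list num_results)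

-- ===== LEMMAS AND PROOFS =====

-- descending lexicographic order on (score, form): pvGe a b ↔ "a ≥ b in Python tuple order"
def pvGe (a b : Int × String) : Prop := b.1 < a.1 ∨ (b.1 = a.1 ∧ b.2 ≤ a.2)

-- the boolean comparison sorted2/max2? use, specialised to fst/snd keys: pvBefore a b ↔ "b < a in tuple order"
def pvBefore (a b : Int × String) : Bool :=
  decide (b.1 < a.1) || (!decide (a.1 < b.1) && decide (b.2 < a.2))

lemma pvGe_refl (a : Int × String) : pvGe a a := Or.inr ⟨rfl, le_refl _⟩

lemma pvGe_trans {a b c : Int × String} (h1 : pvGe a b) (h2 : pvGe b c) : pvGe a c := by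
  rcases h1 with h1 | ⟨h1, h1'⟩ <;> rcases h2 with h2 | ⟨h2, h2'⟩
  · exact Or.inl (h2.trans h1)
  · exact Or.inl (h2 ▸ h1)
  · exact Or.inl (h1 ▸ h2)
  · exact Or.inr ⟨h2.trans h1, h2'.trans h1'⟩

lemma pvGe_antisymm {a b : Int × String} (h1 : pvGe a b) (h2 : pvGe b a) : a = b := by
  rcases h1 with h1 | ⟨h1, h1'⟩ <;> rcases h2 with h2 | ⟨h2, h2'⟩
  · exact absurd h1 (lt_asymm h2)
  · exact absurd h1 (h2 ▸ lt_irrefl _)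
  · exact absurd h2 (h1 ▸ lt_irrefl _)
  · exact Prod.ext h2 (le_antisymm h2' h1')

lemma pvBefore_true {a b : Int × String} (h : pvBefore a b = true) : pvGe a b := by
  unfold pvBefore at h
  rcases Bool.or_eq_true_iff.mp h with h | h
  · exact Or.inl (by simpa using h)
  · rcases Bool.and_eq_true_iff.mp h with ⟨h1, h2⟩
    simp only [Bool.not_eq_eq_eq_not, Bool.not_true, decide_eq_false_iff_not] at h1
    simp only [decide_eq_true_eq] at h2
    rcases lt_or_eq_of_le (not_lt.mp h1) with h | h
    · exact Or.inl h
    · exact Or.inr ⟨h, le_of_lt h2⟩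

lemma pvBefore_false {a b : Int × String} (h : pvBefore a b = false) : pvGe b a := by
  unfold pvBefore at h
  rcases Bool.or_eq_false_iff.mp h with ⟨h1, h2⟩
  simp only [decide_eq_false_iff_not, not_lt] at h1
  rcases lt_or_eq_of_le h1 with h3 | h3
  · exact Or.inl h3
  · refine Or.inr ⟨h3, ?_⟩
    rcases Bool.and_eq_false_iff.mp h2 with h4 | h4
    · simp only [Bool.not_eq_false', decide_eq_true_eq] at h4
      exact absurd h4 (h3 ▸ lt_irrefl _)
    · simpa [not_lt] using (by simpa using h4 : ¬ b.2 < a.2)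

-- insertion preserves descending pairwise order
lemma pairwise_insertBy (x : Int × String) (l : List (Int × String))
    (hl : l.Pairwise pvGe) :
    (PySem.List.insertBy (fun a b => pvBefore a b) x l).Pairwise pvGe := by
  induction l with
  | nil => simp [PySem.List.insertBy]
  | cons y ys ih =>
    rw [PySem.List.insertBy]
    rcases List.pairwise_cons.mp hl with ⟨hy, hys⟩
    by_cases h : pvBefore x y = true
    · simp only [h, if_true]
      refine List.pairwise_cons.mpr ⟨?_, hl⟩
      intro z hz
      rcases List.mem_cons.mp hz with rfl | hz
      · exact pvBefore_true h
      · exact pvGe_trans (pvBefore_true h) (hy z hz)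
    · simp only [Bool.not_eq_true] at h
      simp only [h]
      refine List.pairwise_cons.mpr ⟨?_, ih hys⟩
      intro z hz
      rcases (PySem.List.mem_insertBy _ x z ys).mp hz with rfl | hz
      · exact pvBefore_false h
      · exact hy z hz

lemma pairwise_foldl_insertBy (xs : List (Int × String)) :
    ∀ acc : List (Int × String), acc.Pairwise pvGe →
      (xs.foldl (fun acc x => PySem.List.insertBy (fun a b => pvBefore a b) x acc) acc).Pairwise pvGe := by
  induction xs with
  | nil => intro acc h; simpa using h
  | cons x xs ih =>
    intro acc h
    exact ih _ (pairwise_insertBy x acc h)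

-- sorted2 with fst/snd keys, reverse=True, IS insertion sort with pvBefore (definitional)
lemma sorted2_eq_foldl (l : List (Int × String)) :
    PySem.List.sorted2 l Prod.fst Prod.snd true
      = l.foldl (fun acc x => PySem.List.insertBy (fun a b => pvBefore a b) x acc) [] := rfl

lemma sorted2_pairwise (l : List (Int × String)) :
    (PySem.List.sorted2 l Prod.fst Prod.snd true).Pairwise pvGe := by
  rw [sorted2_eq_foldl]
  exact pairwise_foldl_insertBy l [] (by simp)

-- max2? with fst/snd keys IS a foldl of pvBefore-steps (definitional)
def pvStep (acc : Option (Int × String)) (x : Int × String) : Option (Int × String) :=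
  match acc with
  | none => some x
  | some m => if pvBefore x m = true then some x else some m

lemma max2?_eq_foldl (l : List (Int × String)) :
    PySem.List.max2? l Prod.fst Prod.snd = l.foldl pvStep none := by
  unfold PySem.List.max2?
  congr 1
  funext acc x
  cases acc <;> simp [pvStep, pvBefore]

lemma max2?_aux (l : List (Int × String)) :
    ∀ a : Int × String, ∃ m, l.foldl pvStep (some a) = some m ∧ (m ∈ l ∨ m = a) ∧ pvGe m a ∧ ∀ y ∈ l, pvGe m y := by
  induction l with
  | nil => intro a; exact ⟨a, rfl, Or.inr rfl, pvGe_refl a, by simp⟩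
  | cons x xs ih =>
    intro a
    by_cases h : pvBefore x a = true
    · obtain ⟨m, hm, hmem, hge, hall⟩ := ih x
      refine ⟨m, ?_, ?_, pvGe_trans hge (pvBefore_true h), ?_⟩
      · simpa [List.foldl_cons, pvStep, h] using hm
      · rcases hmem with h' | rfl
        · exact Or.inl (List.mem_cons_of_mem _ h')
        · exact Or.inl List.mem_cons_self
      · intro y hy
        rcases List.mem_cons.mp hy with rfl | hy
        · exact hge
        · exact hall y hy
    · obtain ⟨m, hm, hmem, hge, hall⟩ := ih a
      have h' : pvBefore x a = false := by simpa using h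
      refine ⟨m, ?_, ?_, hge, ?_⟩
      · simpa [List.foldl_cons, pvStep, h] using hm
      · rcases hmem with h'' | rfl
        · exact Or.inl (List.mem_cons_of_mem _ h'')
        · exact Or.inr rfl
      · intro y hy
        rcases List.mem_cons.mp hy with rfl | hy
        · exact pvGe_trans hge (pvBefore_false h')
        · exact hall y hy

lemma max2?_spec (l : List (Int × String)) (h : l ≠ []) :
    ∃ m, PySem.List.max2? l Prod.fst Prod.snd = some m ∧ m ∈ l ∧ ∀ y ∈ l, pvGe m y := by
  rcases l with _ | ⟨x, xs⟩
  · exact absurd rfl h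
  · obtain ⟨m, hm, hmem, hge, hall⟩ := max2?_aux xs x
    refine ⟨m, ?_, ?_, ?_⟩
    · rw [max2?_eq_foldl]; simpa [List.foldl_cons, pvStep] using hm
    · rcases hmem with h' | rfl
      · exact List.mem_cons_of_mem _ h'
      · exact List.mem_cons_self
    · intro y hy
      rcases List.mem_cons.mp hy with rfl | hy
      · exact hge
      · exact hall y hy

-- the key step: sorting descending = max first, then sort the rest
lemma sorted2_cons_max (l : List (Int × String)) (m : Int × String)
    (hmem : m ∈ l)
    (hall : ∀ y ∈ l, pvGe m y) :
    PySem.List.sorted2 l Prod.fst Prod.snd true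
      = m :: PySem.List.sorted2 (l.erase m) Prod.fst Prod.snd true := by
  apply List.Perm.eq_of_pairwise (le := pvGe) (l₂ := m :: PySem.List.sorted2 (l.erase m) Prod.fst Prod.snd true)
  · intro a b _ _ h1 h2; exact pvGe_antisymm h1 h2
  · exact sorted2_pairwise l
  · refine List.pairwise_cons.mpr ⟨?_, sorted2_pairwise _⟩
    intro y hy
    have : y ∈ l.erase m := (PySem.List.sorted2_perm _ _ _ _).mem_iff.mp hy
    exact hall y (List.mem_of_mem_erase this)
  · exact ((PySem.List.sorted2_perm l Prod.fst Prod.snd true).trans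
      (List.perm_cons_erase hmem)).trans
      (((PySem.List.sorted2_perm (l.erase m) Prod.fst Prod.snd true).symm).cons m)

-- extraction = take of the descending sort
lemma pvExtract_eq_take (k : Nat) : ∀ l : List (Int × String),
    pvExtract k l = ((PySem.List.sorted2 l Prod.fst Prod.snd true).take k).map Prod.snd := by
  induction k with
  | zero => intro l; simp [pvExtract]
  | succ k ih =>
    intro l
    by_cases hl : l = []
    · subst hl; rfl
    · obtain ⟨m, hmax, hmem, hall⟩ := max2?_spec l hl
      rw [pvExtract, hmax]
      show m.2 :: pvExtract k ((PySem.List.remove? l m).getD []) = _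
      rw [PySem.List.remove?_eq_some_erase l m hmem]
      simp only [Option.getD_some]
      rw [ih (l.erase m), sorted2_cons_max l m hmem hall]
      simp

-- the two scoring loops build the same scored list
lemma foldl_if_add (p : String → Bool) (f : String → Int) (ws : List String) :
    ∀ a : Int, ws.foldl (fun s w => if p w then s + f w else s) a = a + ((ws.filter p).map f).sum := by
  induction ws with
  | nil => intro a; simp
  | cons w ws ih =>
    intro a
    by_cases h : p w
    · simp [h, ih]; ring
    · simp [h, ih]

-- ===== VERDICT (by name: the statement is the Claim_ definition above) =====
theorem fallback_keyword_matching_spec : Claim_equal_fallback_keyword_matching := by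
  intro user_input forms_list num_results _ hpre
  unfold Spec_fallback_keyword_matching fallback_keyword_matching fallback_keyword_matching_alt
  simp only []
  -- identify the two scored lists
  have hscore : (fun (acc : List (Int × String)) (form : String) =>
      let form_words := PySem.Str.split₀ (PySem.Str.replace (PySem.Str.replace (PySem.Str.lower form) ".pdf" "") "_" " ")
      let score : Int := form_words.foldl (fun score word =>
          if PySem.Str.isIn word (PySem.Str.lower user_input) then score + PySem.Str.len word else score) 0
      if 0 < score then acc ++ [(score, form)] else acc)
      = (fun (acc : List (Int × String)) (form : String) =>
      let words := PySem.Str.split₀ (PySem.Str.replace (PySem.Str.replace (PySem.Str.lower form) ".pdf" "") "_" " ")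
      let score : Int := ((words.filter (fun w => PySem.Str.isIn w (PySem.Str.lower user_input))).map (fun w => PySem.Str.len w)).sum
      if 0 < score then acc ++ [(score, form)] else acc) := by
    funext acc form
    simp only [foldl_if_add, zero_add]
  rw [hscore]
  set l := forms_list.foldl (fun (acc : List (Int × String)) (form : String) =>
      let words := PySem.Str.split₀ (PySem.Str.replace (PySem.Str.replace (PySem.Str.lower form) ".pdf" "") "_" " ")
      let score : Int := ((words.filter (fun w => PySem.Str.isIn w (PySem.Str.lower user_input))).map (fun w => PySem.Str.len w)).sum
      if 0 < score then acc ++ [(score, form)] else acc) [] with hldef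
  have hlen : (PySem.List.sorted2 l Prod.fst Prod.snd true).length = l.length :=
    (PySem.List.sorted2_perm _ _ _ _).length_eq
  by_cases hl : l = []
  · simp [hl, sorted2_eq_foldl]
  · have hsn : PySem.List.sorted2 l Prod.fst Prod.snd true ≠ [] := by
      intro h; apply hl; have := hlen; rw [h] at this; exact List.length_eq_zero_iff.mp this.symm
    rw [if_pos hsn, if_neg hl]
    rw [pvExtract_eq_take]
    rw [PySem.List.slice_to _ hpre]
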